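-- pv_equiv track=rewrite | github.com/Harry-Xiaoo/works | Blast.py | find_potential_matches
-- ===== SOURCE A (Python) =====
-- from collections import defaultdict
--
-- def create_kmer_index(sequence, k):
--     """ 创建k-mer索引，返回一个字典，其中键是k-mer，值是k-mer出现的所有位置 """
--     kmer_index = defaultdict(list)
--     for i in range(len(sequence) - k + 1):
--         kmer = sequence[i:i + k]
--         kmer_index[kmer].append(i)
--     return kmer_index
--
-- def find_potential_matches(query, db_sequence, k):
--     """ 在数据库序列中查找潜在的匹配序列 """
--     kmer_index = create_kmer_index(db_sequence, k)
--     potential_matches = []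
--
--     for i in range(len(query) - k + 1):
--         query_kmer = query[i:i + k]
--         if query_kmer in kmer_index:
--             potential_matches.extend(kmer_index[query_kmer])
--
--     return sorted(set(potential_matches))
-- ===== SOURCE B (Python) =====
-- def find_potential_matches(query, db_sequence, k):
--     """ 在数据库序列中查找潜在的匹配序列 """
--     query_kmers = {query[i:i + k] for i in range(len(query) - k + 1)}
--     positions = [i for i in range(len(db_sequence) - k + 1)
--                  if db_sequence[i:i + k] in query_kmers]
--     return sorted(set(positions))
-- ===== Notes on version B (the rewrite author's own statement) =====
-- stated objective: simpler
-- what changed: Instead of building a kmer->positions index of the database and concatenating stored position lists per matching query kmer, B builds a set of the query's k-mers and obtains positions directly from a single scan of the database.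
import Mathlib
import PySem

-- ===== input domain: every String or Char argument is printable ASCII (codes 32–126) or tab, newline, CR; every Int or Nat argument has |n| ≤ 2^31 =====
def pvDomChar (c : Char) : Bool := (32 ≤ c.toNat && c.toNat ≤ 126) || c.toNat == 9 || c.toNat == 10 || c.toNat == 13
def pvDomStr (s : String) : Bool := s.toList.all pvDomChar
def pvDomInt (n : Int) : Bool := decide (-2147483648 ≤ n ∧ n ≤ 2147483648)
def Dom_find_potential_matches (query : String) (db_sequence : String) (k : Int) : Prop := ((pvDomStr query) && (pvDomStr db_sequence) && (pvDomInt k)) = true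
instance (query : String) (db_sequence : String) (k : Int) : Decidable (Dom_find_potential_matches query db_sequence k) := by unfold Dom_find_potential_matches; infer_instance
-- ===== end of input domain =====

-- B indexes the query's k-mers as a set and reads positions straight off one db scan,
-- instead of A's kmer->position-list index of the database; objective: simpler (same cost).

-- ===== PORT A =====
-- create_kmer_index(sequence, k): defaultdict(list); kmer_index[kmer].append(i)
def create_kmer_index (sequence : String) (k : Int) : PySem.Dict String (List Int) :=
  (PySem.List.pyRange 0 (PySem.Str.len sequence - k + 1) 1).foldl
    (fun d i => d.modify (PySem.Str.slice sequence (some i) (some (i + k))) [] (· ++ [i]))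
    PySem.Dict.empty

def find_potential_matches (query : String) (db_sequence : String) (k : Int) : List Int :=
  let kmer_index := create_kmer_index db_sequence k
  let potential_matches :=
    (PySem.List.pyRange 0 (PySem.Str.len query - k + 1) 1).foldl
      (fun acc i =>
        let query_kmer := PySem.Str.slice query (some i) (some (i + k))
        if kmer_index.contains query_kmer then acc ++ kmer_index.getD query_kmer [] else acc)
      []
  PySem.List.sorted (PySem.Set.ofList potential_matches) (fun x => x) false

-- ===== PORT B =====
def find_potential_matches_alt (query : String) (db_sequence : String) (k : Int) : List Int :=
  let query_kmers : PySem.Set String :=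
    (PySem.List.pyRange 0 (PySem.Str.len query - k + 1) 1).foldl
      (fun s i => PySem.Set.add s (PySem.Str.slice query (some i) (some (i + k))))
      PySem.Set.empty
  let positions :=
    (PySem.List.pyRange 0 (PySem.Str.len db_sequence - k + 1) 1).filter
      (fun i => PySem.Set.contains query_kmers (PySem.Str.slice db_sequence (some i) (some (i + k))))
  PySem.List.sorted (PySem.Set.ofList positions) (fun x => x) false

-- ===== PRECONDITION & SPEC =====
def Spec_find_potential_matches (query : String) (db_sequence : String) (k : Int) (out : List Int) : Prop := out = find_potential_matches_alt query db_sequence k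
instance (query : String) (db_sequence : String) (k : Int) (out : List Int) : Decidable (Spec_find_potential_matches query db_sequence k out) := by unfold Spec_find_potential_matches; infer_instance

-- ===== CLAIM (what is proved, stated in full; the proofs are below) =====
def Claim_equal_find_potential_matches : Prop := ∀ (query : String) (db_sequence : String) (k : Int), Dom_find_potential_matches query db_sequence k → Spec_find_potential_matches query db_sequence k (find_potential_matches query db_sequence k)

-- ===== LEMMAS AND PROOFS =====

-- the db index, looked up at kmer c, holds exactly the db range positions whose slice is c
theorem getD_create_kmer_index (sequence : String) (k : Int) (c : String) :
    (create_kmer_index sequence k).getD c [] =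
      (PySem.List.pyRange 0 (PySem.Str.len sequence - k + 1) 1).filter
        (fun i => PySem.Str.slice sequence (some i) (some (i + k)) == c) := by
  unfold create_kmer_index
  have h := PySem.Dict.getD_foldl_modify_append
    ((PySem.List.pyRange 0 (PySem.Str.len sequence - k + 1) 1).map
      (fun j => (PySem.Str.slice sequence (some j) (some (j + k)), j)))
    PySem.Dict.empty c
  rw [List.foldl_map] at h
  simp only [List.filter_map, List.map_map, Function.comp_def] at h
  simpa using h

theorem contains_create_kmer_index (sequence : String) (k : Int) (c : String) :
    (create_kmer_index sequence k).contains c = true ↔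
      ∃ i ∈ PySem.List.pyRange 0 (PySem.Str.len sequence - k + 1) 1,
        PySem.Str.slice sequence (some i) (some (i + k)) = c := by
  unfold create_kmer_index
  rw [PySem.Dict.contains_iff_mem_keys, PySem.Dict.keys_foldl_modify_key _ (fun i => PySem.Str.slice sequence (some i) (some (i + k)))]
  simp [PySem.Set.mem_update, PySem.Dict.keys_empty, eq_comm]

theorem find_potential_matches_spec' (query : String) (db_sequence : String) (k : Int) :
    find_potential_matches query db_sequence k = find_potential_matches_alt query db_sequence k := by
  unfold find_potential_matches find_potential_matches_alt
  apply PySem.List.sorted_eq_sorted_of_perm _ _ _ (fun a b h => h)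
  apply (List.perm_ext_iff_of_nodup (PySem.Set.nodup_ofList _) (PySem.Set.nodup_ofList _)).mpr
  intro x
  rw [PySem.Set.mem_ofList, PySem.Set.mem_ofList]
  -- A's accumulated list
  have hA : ∀ acc : List Int,
      ((PySem.List.pyRange 0 (PySem.Str.len query - k + 1) 1).foldl
        (fun acc i =>
          let query_kmer := PySem.Str.slice query (some i) (some (i + k))
          if (create_kmer_index db_sequence k).contains query_kmer then
            acc ++ (create_kmer_index db_sequence k).getD query_kmer [] else acc) acc)
      = acc ++ (PySem.List.pyRange 0 (PySem.Str.len query - k + 1) 1).flatMap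
          (fun j => (PySem.List.pyRange 0 (PySem.Str.len db_sequence - k + 1) 1).filter
            (fun i => PySem.Str.slice db_sequence (some i) (some (i + k))
                      == PySem.Str.slice query (some j) (some (j + k)))) := by
    intro acc
    rw [← PySem.List.foldl_append_eq_flatMap]
    apply PySem.List.foldl_congr_mem
    intro b a _
    by_cases h : (create_kmer_index db_sequence k).contains (PySem.Str.slice query (some a) (some (a + k))) = true
    · simp only [h, if_true, getD_create_kmer_index]
    · simp only [h]
      have : (PySem.List.pyRange 0 (PySem.Str.len db_sequence - k + 1) 1).filter
          (fun i => PySem.Str.slice db_sequence (some i) (some (i + k))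
                    == PySem.Str.slice query (some a) (some (a + k))) = [] := by
        rw [List.filter_eq_nil_iff]
        intro i hi hc
        exact h ((contains_create_kmer_index db_sequence k _).mpr ⟨i, hi, by simpa using hc⟩)
      rw [this, List.append_nil]
      simp
  rw [hA]
  -- B's membership
  have hB : ∀ y, (y ∈ (PySem.List.pyRange 0 (PySem.Str.len query - k + 1) 1).foldl
      (fun s i => PySem.Set.add s (PySem.Str.slice query (some i) (some (i + k)))) PySem.Set.empty)
      ↔ ∃ j ∈ PySem.List.pyRange 0 (PySem.Str.len query - k + 1) 1,
          y = PySem.Str.slice query (some j) (some (j + k)) := by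
    intro y
    rw [PySem.Set.mem_foldl_add]
    have he : (PySem.Set.empty : PySem.Set String) = [] := rfl
    rw [he]
    simp only [List.not_mem_nil, false_or]
  simp only [List.nil_append, List.mem_flatMap, List.mem_filter, PySem.Set.contains_iff, hB, beq_iff_eq]
  constructor
  · rintro ⟨j, hj, hx, hs⟩
    exact ⟨hx, ⟨j, hj, hs⟩⟩
  · rintro ⟨hx, j, hj, hs⟩
    exact ⟨j, hj, hx, hs⟩

-- ===== VERDICT (by name: the statement is the Claim_ definition above) =====
theorem find_potential_matches_spec : Claim_equal_find_potential_matches := by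
  intro query db_sequence k _
  exact find_potential_matches_spec' query db_sequence k
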